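-- pv_equiv track=rewrite | github.com/dkuulis/aoc | 2024/aoc-2024-20.py | fillwalls
-- ===== SOURCE A (Python) =====
-- from collections import deque
--
-- directions = [(1,0), (0,1), (-1,0), (0,-1)]
--
-- def neighbours(p, maze):
--     size = len(maze)
--     x, y = p
--     for dx, dy in directions:
--         nx = x + dx
--         ny = y + dy
--         if nx >= 0 and nx < size and ny >= 0 and ny < size:
--             yield (nx,ny)
--
-- def get(data, coord):
--     x, y = coord
--     return data[y][x]
--
-- def fillwalls(maze, start, limit):
--     region = {start: 0}
--     queue = deque([start])
--
--     while queue: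
--         p = queue.popleft()
--         d = region[p] + 1
--
--         if p == start or get(maze, p) == '#':
--             for n in neighbours(p, maze):
--                 t = region.get(n, 10000000)
--                 if (t > d):
--                     region[n] = d
--                     queue.append(n)
--
--     return {k: v for k, v in region.items() if v <= limit and v > 0}
-- ===== SOURCE B (Python) =====
-- def fillwalls(maze, start, limit):
--     # Bounded ring-growing search: instead of flooding the whole wall region and
--     # filtering afterwards, stop as soon as the depth exceeds `limit` and build the
--     # answer directly in discovery order (no distance map, no relaxation, no filter).
--     size = len(maze)
--     out = {}
--     seen = {start}
--     frontier = [start]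
--     depth = 1
--     while frontier and depth <= limit:
--         walls = []
--         for px, py in frontier:
--             for nx, ny in ((px + 1, py), (px, py + 1), (px - 1, py), (px, py - 1)):
--                 if 0 <= nx < size and 0 <= ny < size and (nx, ny) not in seen:
--                     seen.add((nx, ny))
--                     out[(nx, ny)] = depth
--                     if maze[ny][nx] == '#':
--                         walls.append((nx, ny))
--         frontier = walls
--         depth += 1
--     return out
-- ===== Notes on version B (the rewrite author's own statement) =====
-- stated objective: alternative
-- what changed: Replaces A's exhaustive flood (deque BFS with t>d distance relaxation over the whole wall region, a region dict with a 10^7 sentinel, and a final dict-comprehension filter) by a bounded ring-growing search that stops as soon as the depth exceeds limit, keeps only a seen-set instead of a distance map, and emits the result pairs directly in discovery order with no post-filter, so cells deeper than limit are never visited at all.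
-- outside the precondition, e.g. on fillwalls(['a#', 'b'], (-1, 0), 3): A returns {(0, 0): 1}, B returns {(0, 0): 1}
import Mathlib
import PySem

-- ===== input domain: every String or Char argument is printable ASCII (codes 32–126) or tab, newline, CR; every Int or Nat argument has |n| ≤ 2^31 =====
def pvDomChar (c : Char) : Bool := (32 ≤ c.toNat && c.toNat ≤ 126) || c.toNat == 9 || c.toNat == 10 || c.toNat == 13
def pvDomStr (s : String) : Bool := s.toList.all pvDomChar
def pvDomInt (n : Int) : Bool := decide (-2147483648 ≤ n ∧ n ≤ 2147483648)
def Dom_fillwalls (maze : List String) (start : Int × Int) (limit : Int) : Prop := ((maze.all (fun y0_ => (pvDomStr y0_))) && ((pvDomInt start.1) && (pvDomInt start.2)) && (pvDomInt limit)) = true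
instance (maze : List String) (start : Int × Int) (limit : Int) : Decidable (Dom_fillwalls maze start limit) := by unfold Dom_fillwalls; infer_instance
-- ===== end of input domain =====

-- B replaces A's exhaustive flood (deque BFS with t>d distance relaxation over the whole wall
-- region, a region dict with a 10^7 sentinel, and a final filtering dict comprehension) by a
-- bounded ring-growing search that stops as soon as the depth exceeds `limit`, keeps a seen-set
-- instead of a distance map, and emits the result pairs directly in discovery order.

abbrev PVDict := PySem.Dict (Int × Int) Int

-- ===== PORT A =====
-- get(data, coord) = data[y][x]; none exactly where Python raises IndexError
def pvGetA (maze : List String) (p : Int × Int) : Option Char :=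
  match PySem.List.pyGet? maze p.2 with
  | none => none
  | some row => PySem.Str.pyGet? row p.1

def pvDirections : List (Int × Int) := [(1, 0), (0, 1), (-1, 0), (0, -1)]

def pvNeighbours (p : Int × Int) (maze : List String) : List (Int × Int) :=
  pvDirections.filterMap (fun dxy =>
    let nx := p.1 + dxy.1
    let ny := p.2 + dxy.2
    if 0 ≤ nx ∧ nx < (maze.length : Int) ∧ 0 ≤ ny ∧ ny < (maze.length : Int) then
      some (nx, ny) else none)

-- A's inner 'for n in neighbours(p, maze)' relaxation loop
def pvRelax (d : Int) : List (Int × Int) → PVDict → List (Int × Int) → PVDict × List (Int × Int)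
  | [], r, q => (r, q)
  | n :: ns, r, q =>
      let t := r.getD n 10000000
      if d < t then pvRelax d ns (r.insert n d) (q ++ [n]) else pvRelax d ns r q

-- A's 'while queue' loop; fuel is a provably sufficient bound on the number of pops
def pvLoopA (maze : List String) (start : Int × Int) :
    Nat → List (Int × Int) → PVDict → PVDict
  | 0, _, r => r
  | _ + 1, [], r => r
  | f + 1, p :: q, r =>
      -- region[p] is always a key when p is popped, so getD's default is never used
      let d := r.getD p 0 + 1
      if p = start ∨ pvGetA maze p = some '#' then
        let rq := pvRelax d (pvNeighbours p maze) r q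
        pvLoopA maze start f rq.2 rq.1
      else pvLoopA maze start f q r

def pvPostA (r : PVDict) (limit : Int) : List (Int × Int × Int) :=
  (r.items.filter (fun kv => decide (kv.2 ≤ limit) && decide (0 < kv.2))).map
    (fun kv => (kv.1.1, kv.1.2, kv.2))

def fillwalls (maze : List String) (start : Int × Int) (limit : Int) : List (Int × Int × Int) :=
  let region : PVDict := PySem.Dict.ofList [(start, (0 : Int))]
  let rfin := pvLoopA maze start (2 * maze.length * maze.length + 2) [start] region
  pvPostA rfin limit

-- ===== PORT B =====
def pvGetB (maze : List String) (n : Int × Int) : Option Char :=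
  (PySem.List.pyGet? maze n.2).bind (fun row => PySem.Str.pyGet? row n.1)

-- the candidate tuple ((px+1,py), (px,py+1), (px-1,py), (px,py-1)) of B's inner loop
def pvNbrsB (p : Int × Int) : List (Int × Int) :=
  [(p.1 + 1, p.2), (p.1, p.2 + 1), (p.1 - 1, p.2), (p.1, p.2 - 1)]

-- B's inner 'for nx, ny in (...)' loop over one frontier cell
def pvCellB (maze : List String) (depth : Int) :
    List (Int × Int) → PySem.Set (Int × Int) → PVDict → List (Int × Int) →
    PySem.Set (Int × Int) × PVDict × List (Int × Int)
  | [], seen, out, walls => (seen, out, walls)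
  | n :: ns, seen, out, walls =>
      if (0 ≤ n.1 ∧ n.1 < (maze.length : Int) ∧ 0 ≤ n.2 ∧ n.2 < (maze.length : Int)) ∧
          PySem.Set.contains seen n = false then
        if pvGetB maze n = some '#' then
          pvCellB maze depth ns (PySem.Set.add seen n) (out.insert n depth) (walls ++ [n])
        else
          pvCellB maze depth ns (PySem.Set.add seen n) (out.insert n depth) walls
      else pvCellB maze depth ns seen out walls

-- B's 'for px, py in frontier' loop of one ring
def pvLevelBn (maze : List String) (depth : Int) :
    List (Int × Int) → PySem.Set (Int × Int) → PVDict → List (Int × Int) →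
    PySem.Set (Int × Int) × PVDict × List (Int × Int)
  | [], seen, out, walls => (seen, out, walls)
  | p :: ps, seen, out, walls =>
      let s := pvCellB maze depth (pvNbrsB p) seen out walls
      pvLevelBn maze depth ps s.1 s.2.1 s.2.2

-- B's 'while frontier and depth <= limit' loop; fuel is a provably sufficient bound on the rings
def pvLoopBn (maze : List String) (limit : Int) :
    Nat → List (Int × Int) → Int → PySem.Set (Int × Int) → PVDict → PVDict
  | 0, _, _, _, out => out
  | f + 1, frontier, depth, seen, out =>
      if frontier ≠ [] ∧ depth ≤ limit then
        let s := pvLevelBn maze depth frontier seen out []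
        pvLoopBn maze limit f s.2.2 (depth + 1) s.1 s.2.1
      else out

def fillwalls_alt (maze : List String) (start : Int × Int) (limit : Int) : List (Int × Int × Int) :=
  (pvLoopBn maze limit (maze.length * maze.length + 3) [start] 1
      (PySem.Set.ofList [start]) PySem.Dict.empty).items.map
    (fun kv => (kv.1.1, kv.1.2, kv.2))

-- ===== PRECONDITION & SPEC =====
-- Manhattan-adjacency of two cells (the four BFS directions)
def pvAdj (a b : Int × Int) : Bool :=
  decide ((a.1 - b.1).natAbs + (a.2 - b.2).natAbs = 1)

-- Pre_ excludes (a) mazes in which some in-grid cell adjacent to start or to an in-grid '#'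
-- cell lies beyond its own row's length, where A's data[y][x] can raise IndexError (this also
-- excludes some inputs A returns on, when such a wall is unreachable from start), and (b) only
-- the combination of a limit ≥ A's 10000000 sentinel with a maze of more than 3162 rows
-- (3162^2 < 10^7), the only regime in which that sentinel is not a true infinity for every
-- reachable BFS depth.
def Pre_fillwalls (maze : List String) (start : Int × Int) (limit : Int) : Prop :=
  (limit < 10000000 ∨ maze.length ≤ 3162) ∧
  ((∀ y ∈ List.range maze.length, ∀ x ∈ List.range maze.length,
      pvAdj ((x : Int), (y : Int)) start = false) ∨
   ∀ y ∈ List.range maze.length, ∀ x ∈ List.range maze.length,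
     (pvAdj ((x : Int), (y : Int)) start = true ∨
      ∃ y' ∈ List.range maze.length, ∃ x' ∈ List.range maze.length,
        pvAdj ((x : Int), (y : Int)) ((x' : Int), (y' : Int)) = true ∧
        (maze.getD y' "").toList[x']? = some '#') →
     x < (maze.getD y "").toList.length)

instance (maze : List String) (start : Int × Int) (limit : Int) :
    Decidable (Pre_fillwalls maze start limit) := by unfold Pre_fillwalls; infer_instance

def pvWitness_fillwalls : List String × (Int × Int) × Int := (["##", "#."], (0, 0), 5)

def Spec_fillwalls (maze : List String) (start : Int × Int) (limit : Int) (out : List (Int × Int × Int)) : Prop := out = fillwalls_alt maze start limit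
instance (maze : List String) (start : Int × Int) (limit : Int) (out : List (Int × Int × Int)) : Decidable (Spec_fillwalls maze start limit out) := by unfold Spec_fillwalls; infer_instance

-- ===== CLAIM (what is proved, stated in full; the proofs are below) =====
def Claim_equal_fillwalls : Prop := ∀ (maze : List String) (start : Int × Int) (limit : Int), Dom_fillwalls maze start limit → Pre_fillwalls maze start limit → Spec_fillwalls maze start limit (fillwalls maze start limit)

-- ===== LEMMAS AND PROOFS =====

-- the filter of A's final dict comprehension
def pvP (limit : Int) : (Int × Int) × Int → Bool :=
  fun kv => decide (kv.2 ≤ limit) && decide (0 < kv.2)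

def pvGrid (size : Nat) : List (Int × Int) :=
  ((List.range size) ×ˢ (List.range size)).map (fun q => ((q.1 : Int), (q.2 : Int)))
lemma mem_pvGrid {size : Nat} {n : Int × Int} :
    n ∈ pvGrid size ↔ 0 ≤ n.1 ∧ n.1 < (size : Int) ∧ 0 ≤ n.2 ∧ n.2 < (size : Int) := by
  simp only [pvGrid, List.mem_map, List.mem_product, List.mem_range, Prod.exists]
  constructor
  · rintro ⟨a, b, ⟨ha, hb⟩, rfl⟩; simp; omega
  · rintro ⟨h1, h2, h3, h4⟩
    exact ⟨n.1.toNat, n.2.toNat, ⟨by omega, by omega⟩, by simp [Prod.ext_iff]; omega⟩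

def pvFree (size : Nat) (r : PVDict) : Nat :=
  ((pvGrid size).filter (fun c => (r.get? c).isNone)).length
lemma pv_filter_flip {α : Type} {l : List α} {p q : α → Bool}
    (hle : ∀ x ∈ l, q x = true → p x = true) {n : α} (hn : n ∈ l)
    (hp : p n = true) (hq : q n = false) :
    (l.filter q).length + 1 ≤ (l.filter p).length := by
  induction l with
  | nil => cases hn
  | cons a l ih =>
    rcases List.mem_cons.mp hn with rfl | hn'
    · rw [List.filter_cons_of_neg (by simp [hq]), List.filter_cons_of_pos (by simp [hp])]
      have : (l.filter q).length ≤ (l.filter p).length := by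
        simp only [← List.countP_eq_length_filter]
        exact List.countP_mono_left (fun x hx h => hle x (List.mem_cons_of_mem _ hx) h)
      simp; omega
    · have ih' := ih (fun x hx h => hle x (List.mem_cons_of_mem _ hx) h) hn'
      by_cases hqa : q a = true
      · rw [List.filter_cons_of_pos (by simp [hqa]),
          List.filter_cons_of_pos (by simp [hle a (List.mem_cons_self) hqa])]
        simpa using ih'
      · rw [List.filter_cons_of_neg (by simpa using hqa)]
        rcases hpa : p a with _ | _
        · rw [List.filter_cons_of_neg (by simp [hpa])]; exact ih'
        · rw [List.filter_cons_of_pos (by simp [hpa])]; simp; omega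
lemma pvFree_insert (size : Nat) (r : PVDict) (n : Int × Int) (v : Int)
    (hg : n ∈ pvGrid size) (hf : r.get? n = none) :
    pvFree size (r.insert n v) + 1 ≤ pvFree size r := by
  refine pv_filter_flip ?_ hg ?_ ?_
  · intro x hx h
    simp only [Option.isNone_iff_eq_none] at h ⊢
    rw [PySem.Dict.get?_insert] at h
    by_cases hxn : x = n
    · simp [hxn] at h
    · rwa [if_neg hxn] at h
  · simp [hf]
  · simp [PySem.Dict.get?_insert_self]

lemma length_pvGrid (size : Nat) : (pvGrid size).length = size * size := by
  simp [pvGrid, List.length_product]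

lemma pvFree_le (size : Nat) (r : PVDict) : pvFree size r ≤ size * size :=
  (List.length_filter_le _ _).trans (le_of_eq (length_pvGrid size))

lemma pvGetA_eq_getB (maze : List String) (n : Int × Int) :
    pvGetA maze n = pvGetB maze n := by
  cases h : PySem.List.pyGet? maze n.2 <;> simp [pvGetA, pvGetB, h]

def pvExpB (maze : List String) (start : Int × Int) (p : Int × Int) : Bool :=
  decide (p = start ∨ pvGetA maze p = some '#')

def pvWallB (maze : List String) (n : Int × Int) : Bool :=
  decide (pvGetB maze n = some '#')

-- B's inner loop, with the in-bounds test already applied to the candidate list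
def pvProcB (maze : List String) (k : Int) :
    List (Int × Int) → PySem.Set (Int × Int) → PVDict → List (Int × Int) →
    PySem.Set (Int × Int) × PVDict × List (Int × Int)
  | [], seen, out, walls => (seen, out, walls)
  | n :: ns, seen, out, walls =>
      if PySem.Set.contains seen n = false then
        if pvGetB maze n = some '#' then
          pvProcB maze k ns (PySem.Set.add seen n) (out.insert n k) (walls ++ [n])
        else pvProcB maze k ns (PySem.Set.add seen n) (out.insert n k) walls
      else pvProcB maze k ns seen out walls

lemma pvCellB_eq_proc (maze : List String) (k : Int) :
    ∀ (cs : List (Int × Int)) (seen : PySem.Set (Int × Int)) (out : PVDict)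
      (walls : List (Int × Int)),
      pvCellB maze k cs seen out walls =
        pvProcB maze k
          (cs.filter (fun n => decide (0 ≤ n.1 ∧ n.1 < (maze.length : Int) ∧
            0 ≤ n.2 ∧ n.2 < (maze.length : Int)))) seen out walls := by
  intro cs
  induction cs with
  | nil => intro seen out walls; rfl
  | cons n cs ih =>
    intro seen out walls
    by_cases hb : 0 ≤ n.1 ∧ n.1 < (maze.length : Int) ∧ 0 ≤ n.2 ∧ n.2 < (maze.length : Int)
    · rw [List.filter_cons_of_pos (by simpa using hb)]
      rw [pvCellB, pvProcB]
      by_cases hc : PySem.Set.contains seen n = false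
      · rw [if_pos ⟨hb, hc⟩, if_pos hc]
        by_cases hw : pvGetB maze n = some '#'
        · rw [if_pos hw, if_pos hw, ih]
        · rw [if_neg hw, if_neg hw, ih]
      · rw [if_neg (by tauto), if_neg hc, ih]
    · rw [List.filter_cons_of_neg (by simpa using hb)]
      rw [pvCellB, if_neg (by tauto), ih]

lemma pvNbrsB_filter (maze : List String) (p : Int × Int) :
    (pvNbrsB p).filter (fun n => decide (0 ≤ n.1 ∧ n.1 < (maze.length : Int) ∧
        0 ≤ n.2 ∧ n.2 < (maze.length : Int))) = pvNeighbours p maze := by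
  simp only [pvNbrsB, pvNeighbours, pvDirections, List.filterMap_cons, List.filterMap_nil,
    List.filter_cons, List.filter_nil, add_zero, ← sub_eq_add_neg, decide_eq_true_eq]
  split_ifs <;> rfl

lemma pvNeighbours_mem_grid (maze : List String) (p n : Int × Int)
    (h : n ∈ pvNeighbours p maze) : n ∈ pvGrid maze.length := by
  simp only [pvNeighbours, List.mem_filterMap] at h
  obtain ⟨dxy, _, heq⟩ := h
  by_cases hb : 0 ≤ p.1 + dxy.1 ∧ p.1 + dxy.1 < (maze.length : Int) ∧
      0 ≤ p.2 + dxy.2 ∧ p.2 + dxy.2 < (maze.length : Int)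
  · rw [if_pos hb] at heq
    cases heq; rw [mem_pvGrid]; exact ⟨hb.1, hb.2.1, hb.2.2.1, hb.2.2.2⟩
  · rw [if_neg hb] at heq; cases heq

lemma pv_filter_map_eq {α : Type} (P : α → Bool) (f : α → α) :
    ∀ l : List α, (∀ p ∈ l, f p = p ∨ (P p = false ∧ P (f p) = false)) →
      (l.map f).filter P = l.filter P := by
  intro l
  induction l with
  | nil => intro _; rfl
  | cons a l ih =>
    intro h
    have ih' := ih (fun p hp => h p (List.mem_cons_of_mem _ hp))
    rcases h a List.mem_cons_self with ha | ⟨ha1, ha2⟩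
    · simp only [List.map_cons, ha, List.filter_cons, ih']
    · simp [ha1, ha2, ih']

-- the coupled inner step (one expansion): A's relaxation = B's scan, on the filtered neighbours
lemma pvInner (maze : List String) (start : Int × Int) (k : Int) (hk : k < 10000000) :
    ∀ (ns : List (Int × Int)) (r : PVDict) (q : List (Int × Int))
      (seen : PySem.Set (Int × Int)) (out : PVDict) (walls : List (Int × Int)),
      (∀ n ∈ ns, n ∈ pvGrid maze.length) →
      (∀ c v, r.get? c = some v → v ≤ k) →
      r.get? start = some 0 →
      r.keys.Nodup →
      (∀ n, n ∈ seen ↔ (r.get? n).isSome = true) →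
      (∀ n, out.contains n = true → (r.get? n).isSome = true) →
      ∃ R seen' out' a,
        pvRelax k ns r q = (R, q ++ a) ∧
        pvProcB maze k ns seen out walls = (seen', out', walls ++ a.filter (pvWallB maze)) ∧
        (∀ c v, r.get? c = some v → R.get? c = some v) ∧
        (∀ c v, R.get? c = some v → v ≤ k) ∧
        R.keys.Nodup ∧
        (∀ n, n ∈ seen' ↔ (R.get? n).isSome = true) ∧
        (∀ x ∈ a, r.get? x = none ∧ x ∈ pvGrid maze.length ∧ R.get? x = some k) ∧
        R.items = r.items ++ a.map (fun n => (n, k)) ∧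
        out'.items = out.items ++ a.map (fun n => (n, k)) ∧
        pvFree maze.length R + a.length ≤ pvFree maze.length r := by
  intro ns
  induction ns with
  | nil =>
    intro r q seen out walls _ hval hstart hnd hseen hout
    exact ⟨r, seen, out, [], by simp [pvRelax], by simp [pvProcB], fun c v h => h, hval, hnd,
      hseen, by simp, by simp, by simp, by simp⟩
  | cons n ns ih =>
    intro r q seen out walls hg hval hstart hnd hseen hout
    have hgn : n ∈ pvGrid maze.length := hg n List.mem_cons_self
    have hgs : ∀ m ∈ ns, m ∈ pvGrid maze.length := fun m hm => hg m (List.mem_cons_of_mem _ hm)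
    cases hf : r.get? n with
    | some v =>
      have ht : r.getD n 10000000 = v := PySem.Dict.getD_of_get?_eq_some r 10000000 hf
      have hv := hval n v hf
      have hcont : PySem.Set.contains seen n = true := by
        rw [PySem.Set.contains_iff]
        exact (hseen n).mpr (by simp [hf])
      obtain ⟨R, seen', out', a, h1, h2, hpers, hval2, hnd2, hseen2, ha, hri, hoi, hfree⟩ :=
        ih r q seen out walls hgs hval hstart hnd hseen hout
      refine ⟨R, seen', out', a, ?_, ?_, hpers, hval2, hnd2, hseen2, ha, hri, hoi, hfree⟩
      · rw [pvRelax]; simp only [ht]; rw [if_neg (by omega)]; exact h1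
      · rw [pvProcB, if_neg (by simp only [hcont]; simp)]; exact h2
    | none =>
      have ht : r.getD n 10000000 = 10000000 := PySem.Dict.getD_of_get?_eq_none r 10000000 hf
      have hcont : PySem.Set.contains seen n = false := by
        rcases hc : PySem.Set.contains seen n with _ | _
        · rfl
        · exfalso
          have := (hseen n).mp (PySem.Set.contains_iff seen n |>.mp hc)
          rw [hf] at this; simp at this
      have hrc : r.contains n = false := by
        rw [PySem.Dict.contains_eq_isSome_get?, hf]; rfl
      have hoc : out.contains n = false := by
        rcases hc : out.contains n with _ | _
        · rfl
        · exfalso; have := hout n hc; rw [hf] at this; simp at this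
      have hval' : ∀ c v, ((r.insert n k).get? c) = some v → v ≤ k := by
        intro c v h
        rw [PySem.Dict.get?_insert] at h
        by_cases hc : c = n
        · rw [if_pos hc] at h; cases h; exact le_refl k
        · rw [if_neg hc] at h; exact hval c v h
      have hne : start ≠ n := fun h => by rw [h, hf] at hstart; cases hstart
      have hstart' : (r.insert n k).get? start = some 0 :=
        (PySem.Dict.get?_insert_of_ne r k hne).trans hstart
      have hnd' : (r.insert n k).keys.Nodup := PySem.Dict.nodup_keys_insert r n k hnd
      have hseen' : ∀ m, m ∈ PySem.Set.add seen n ↔ (((r.insert n k).get? m).isSome = true) := by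
        intro m
        rw [PySem.Set.mem_add, PySem.Dict.get?_insert]
        by_cases hm : m = n
        · simp [hm]
        · simp only [if_neg hm, hseen m]
          constructor
          · rintro (h | h)
            · exact h
            · exact absurd h hm
          · exact fun h => Or.inl h
      have hout' : ∀ m, (out.insert n k).contains m = true → (((r.insert n k).get? m).isSome = true) := by
        intro m hm
        rw [PySem.Dict.contains_insert] at hm
        rw [PySem.Dict.get?_insert]
        by_cases hmn : m = n
        · simp [hmn]
        · rw [if_neg hmn]
          rcases (Bool.or_eq_true _ _).mp hm with h | h
          · exact absurd (by simpa using h) hmn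
          · exact hout m h
      have hfr : pvFree maze.length (r.insert n k) + 1 ≤ pvFree maze.length r :=
        pvFree_insert _ r n k hgn hf
      have hri0 : (r.insert n k).items = r.items ++ [(n, k)] :=
        PySem.Dict.items_insert_of_not_contains r k hrc
      have hoi0 : (out.insert n k).items = out.items ++ [(n, k)] :=
        PySem.Dict.items_insert_of_not_contains out k hoc
      have hpers0 : ∀ c v, r.get? c = some v → (r.insert n k).get? c = some v := by
        intro c v h
        have hc : c ≠ n := fun hcn => by rw [hcn, hf] at h; cases h
        rw [PySem.Dict.get?_insert_of_ne r k hc]; exact h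
      obtain ⟨R, seen', out', a, h1, h2, hpers, hval2, hnd2, hseen2, ha, hri, hoi, hfree⟩ :=
        ih (r.insert n k) (q ++ [n]) (PySem.Set.add seen n) (out.insert n k)
          (if pvGetB maze n = some '#' then walls ++ [n] else walls)
          hgs hval' hstart' hnd' hseen' hout'
      have hfacts : ∀ x ∈ n :: a, r.get? x = none ∧ x ∈ pvGrid maze.length ∧ R.get? x = some k := by
        intro x hx
        rcases List.mem_cons.mp hx with rfl | hx'
        · exact ⟨hf, hgn, hpers x k (PySem.Dict.get?_insert_self r x k)⟩
        · obtain ⟨hx1, hx2, hx3⟩ := ha x hx'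
          have hxn : x ≠ n := fun hxe => by
            rw [hxe, PySem.Dict.get?_insert_self] at hx1; cases hx1
          refine ⟨?_, hx2, hx3⟩
          rw [← PySem.Dict.get?_insert_of_ne r k hxn]; exact hx1
      refine ⟨R, seen', out', n :: a, ?_, ?_, ?_, hval2, hnd2, hseen2, hfacts, ?_, ?_, ?_⟩
      · rw [pvRelax]; simp only [ht]; rw [if_pos (by omega)]
        rw [h1, List.append_assoc]; rfl
      · rw [pvProcB, if_pos hcont]
        by_cases hw : pvGetB maze n = some '#'
        · rw [if_pos hw]
          rw [if_pos hw] at h2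
          rw [h2, List.filter_cons_of_pos (by simp [pvWallB, hw]), List.append_assoc]; rfl
        · rw [if_neg hw]
          rw [if_neg hw] at h2
          rw [h2, List.filter_cons_of_neg (by simp [pvWallB, hw])]
      · intro c v h; exact hpers c v (hpers0 c v h)
      · rw [hri, hri0, List.append_assoc]; rfl
      · rw [hoi, hoi0, List.append_assoc]; rfl
      · simp only [List.length_cons]; omega

-- items of out are keys of r (minus start)
lemma pvOutSub (start : Int × Int) (r out : PVDict)
    (hro : r.items = ((start, (0 : Int))) :: out.items) :
    ∀ n, out.contains n = true → (r.get? n).isSome = true := by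
  intro n h
  have hk : n ∈ out.keys := (PySem.Dict.contains_iff_mem_keys out n).mp h
  have hk' : n ∈ r.keys := by
    simp only [PySem.Dict.keys, hro, List.map_cons] at hk ⊢
    exact List.mem_cons_of_mem _ hk
  rcases hg : r.get? n with _ | v
  · exact absurd hk' ((PySem.Dict.get?_eq_none_iff_not_mem_keys r n).mp hg)
  · rfl

-- ==== phase 2: once every expandable queue entry is at depth ≥ limit, the filtered items freeze

lemma pvRelaxBig (maze : List String) (start : Int × Int) (limit d : Int) (hd : limit < d) :
    ∀ (ns : List (Int × Int)) (r : PVDict) (q : List (Int × Int)),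
      r.keys.Nodup →
      (∀ p ∈ q, pvExpB maze start p = true → ∃ v, r.get? p = some v ∧ limit ≤ v) →
      ((pvRelax d ns r q).1.items.filter (pvP limit) = r.items.filter (pvP limit)) ∧
      (pvRelax d ns r q).1.keys.Nodup ∧
      (∀ p ∈ (pvRelax d ns r q).2, pvExpB maze start p = true →
        ∃ v, (pvRelax d ns r q).1.get? p = some v ∧ limit ≤ v) := by
  intro ns
  induction ns with
  | nil =>
    intro r q hnd hq
    exact ⟨rfl, hnd, hq⟩
  | cons n ns ih =>
    intro r q hnd hq
    by_cases hlt : d < r.getD n 10000000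
    · have hstep : pvRelax d (n :: ns) r q = pvRelax d ns (r.insert n d) (q ++ [n]) := by
        rw [pvRelax]; simp only [if_pos hlt]
      have hfil : (r.insert n d).items.filter (pvP limit) = r.items.filter (pvP limit) := by
        rcases hc : r.contains n with _ | _
        · rw [PySem.Dict.items_insert_of_not_contains r d hc, List.filter_append]
          have : pvP limit (n, d) = false := by simp [pvP]; omega
          simp [this]
        · have hsome : (r.get? n).isSome = true := by
            rw [← PySem.Dict.contains_eq_isSome_get?]; exact hc
          obtain ⟨t0, ht0⟩ := Option.isSome_iff_exists.mp hsome
          have htd : r.getD n 10000000 = t0 := PySem.Dict.getD_of_get?_eq_some r 10000000 ht0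
          have ht0big : limit < t0 := by rw [htd] at hlt; omega
          rw [PySem.Dict.items_insert_of_contains r d hc]
          refine pv_filter_map_eq _ _ _ ?_
          intro p hp
          by_cases hpn : p.1 = n
          · right
            have hp' : (n, p.2) ∈ r.items := by
              have : p = (n, p.2) := by rw [Prod.ext_iff]; exact ⟨hpn, rfl⟩
              rwa [← this]
            have := PySem.Dict.get?_of_mem_items _ hp' hnd
            rw [ht0] at this
            have hp2 : p.2 = t0 := by injection this.symm
            constructor
            · simp [pvP, hp2]; omega
            · simp only [hpn, beq_self_eq_true, if_pos]
              simp [pvP]; omega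
          · left; simp [hpn]
      have hq' : ∀ p ∈ q ++ [n], pvExpB maze start p = true →
          ∃ v, (r.insert n d).get? p = some v ∧ limit ≤ v := by
        intro p hp _
        rw [PySem.Dict.get?_insert]
        by_cases hpn : p = n
        · exact ⟨d, by rw [if_pos hpn], by omega⟩
        · rw [if_neg hpn]
          rcases List.mem_append.mp hp with hp' | hp'
          · obtain ⟨v, hv, hlv⟩ := hq p hp' ‹_›
            exact ⟨v, hv, hlv⟩
          · exact absurd (List.mem_singleton.mp hp') hpn
      obtain ⟨h1, h2, h3⟩ := ih (r.insert n d) (q ++ [n])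
        (PySem.Dict.nodup_keys_insert r n d hnd) hq'
      rw [hstep]
      exact ⟨h1.trans hfil, h2, h3⟩
    · have hstep : pvRelax d (n :: ns) r q = pvRelax d ns r q := by
        rw [pvRelax]; simp only [if_neg hlt]
      rw [hstep]
      exact ih r q hnd hq

lemma pvPhase2 (maze : List String) (start : Int × Int) (limit : Int) :
    ∀ (fA : Nat) (q : List (Int × Int)) (r : PVDict),
      r.keys.Nodup →
      (∀ p ∈ q, pvExpB maze start p = true → ∃ v, r.get? p = some v ∧ limit ≤ v) →
      (pvLoopA maze start fA q r).items.filter (pvP limit) = r.items.filter (pvP limit) := by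
  intro fA
  induction fA with
  | zero => intro q r _ _; rfl
  | succ fA ih =>
    intro q r hnd hq
    cases q with
    | nil => rfl
    | cons p q' =>
      by_cases hexp : p = start ∨ pvGetA maze p = some '#'
      · have hexpb : pvExpB maze start p = true := by simp [pvExpB]; exact hexp
        obtain ⟨v, hv, hlv⟩ := hq p List.mem_cons_self hexpb
        have hd : r.getD p 0 + 1 = v + 1 := by
          rw [PySem.Dict.getD_of_get?_eq_some r 0 hv]
        obtain ⟨h1, h2, h3⟩ := pvRelaxBig maze start limit (v + 1) (by omega)
          (pvNeighbours p maze) r q' hnd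
          (fun x hx he => hq x (List.mem_cons_of_mem _ hx) he)
        have hLHS : pvLoopA maze start (fA + 1) (p :: q') r =
            pvLoopA maze start fA (pvRelax (v + 1) (pvNeighbours p maze) r q').2
              (pvRelax (v + 1) (pvNeighbours p maze) r q').1 := by
          rw [pvLoopA]; simp only [hd, if_pos hexp]
        rw [hLHS, ih _ _ h2 h3, h1]
      · have hLHS : pvLoopA maze start (fA + 1) (p :: q') r = pvLoopA maze start fA q' r := by
          rw [pvLoopA]; simp only [if_neg hexp]
        rw [hLHS]
        exact ih q' r hnd (fun x hx he => hq x (List.mem_cons_of_mem _ hx) he)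

-- ==== B-side loop plumbing

def pvContBn (maze : List String) (limit : Int) (fB : Nat) (F N : List (Int × Int)) (k : Int)
    (seen : PySem.Set (Int × Int)) (out : PVDict) : PVDict :=
  let s := pvLevelBn maze k F seen out N
  pvLoopBn maze limit fB s.2.2 (k + 1) s.1 s.2.1

lemma pvContBn_nilF (maze : List String) (limit : Int) (fB : Nat) (N : List (Int × Int))
    (k : Int) (seen : PySem.Set (Int × Int)) (out : PVDict) :
    pvContBn maze limit fB [] N k seen out = pvLoopBn maze limit fB N (k + 1) seen out := rfl

lemma pvLoopBn_enter (maze : List String) (limit : Int) (f : Nat) (frontier : List (Int × Int))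
    (depth : Int) (seen : PySem.Set (Int × Int)) (out : PVDict)
    (h1 : frontier ≠ []) (h2 : depth ≤ limit) :
    pvLoopBn maze limit (f + 1) frontier depth seen out =
      pvContBn maze limit f frontier [] depth seen out := by
  rw [pvLoopBn, if_pos ⟨h1, h2⟩]; rfl

lemma pvLoopBn_exit (maze : List String) (limit : Int) (f : Nat) (frontier : List (Int × Int))
    (depth : Int) (seen : PySem.Set (Int × Int)) (out : PVDict)
    (h : frontier = [] ∨ limit < depth) :
    pvLoopBn maze limit f frontier depth seen out = out := by
  cases f with
  | zero => rfl
  | succ f =>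
    rw [pvLoopBn, if_neg]
    rintro ⟨h1, h2⟩
    rcases h with h | h
    · exact h1 h
    · omega

lemma pvContBn_step (maze : List String) (limit : Int) (fB : Nat) (p : Int × Int)
    (F N N' : List (Int × Int)) (k : Int) (seen seen' : PySem.Set (Int × Int)) (out out' : PVDict)
    (hrn : pvCellB maze k (pvNbrsB p) seen out N = (seen', out', N')) :
    pvContBn maze limit fB (p :: F) N k seen out = pvContBn maze limit fB F N' k seen' out' := by
  simp only [pvContBn, pvLevelBn, hrn]

-- keeping every filtered item: in phase 1 all of out's values lie in [1, limit]
lemma pvOutKeep (limit k : Int) (hkl : k ≤ limit) (start : Int × Int) (r out : PVDict)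
    (hro : r.items = ((start, (0 : Int))) :: out.items)
    (hnd : r.keys.Nodup)
    (hlow : ∀ kv ∈ out.items, 1 ≤ kv.2)
    (hval : ∀ c v, r.get? c = some v → v ≤ k) :
    r.items.filter (pvP limit) = out.items := by
  rw [hro, List.filter_cons]
  have h0 : pvP limit ((start, (0 : Int))) = false := by simp [pvP]
  rw [h0]
  simp only [Bool.false_eq_true, if_false]
  refine List.filter_eq_self.mpr ?_
  intro kv hkv
  have hmem : (kv.1, kv.2) ∈ r.items := by rw [hro]; exact List.mem_cons_of_mem _ (by simpa using hkv)
  have := PySem.Dict.get?_of_mem_items _ hmem hnd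
  have hub := hval kv.1 kv.2 this
  have hlb := hlow kv hkv
  simp [pvP]; omega

-- ==== the coupled outer induction (phase 1, k ≤ limit)

lemma pvOuter (maze : List String) (start : Int × Int) (limit : Int)
    (hcap : limit < 10000000 ∨ maze.length ≤ 3162) :
    ∀ (fA : Nat) (q F N : List (Int × Int)) (k : Int) (r : PVDict)
      (seen : PySem.Set (Int × Int)) (out : PVDict) (cs : List (Int × Int)) (fB : Nat),
      q.filter (pvExpB maze start) = F ++ N →
      (∀ p ∈ F, r.get? p = some (k - 1)) →
      (∀ n ∈ N, r.get? n = some k ∧ n ∈ pvGrid maze.length) →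
      (∀ c v, r.get? c = some v → v ≤ k) →
      r.get? start = some 0 →
      1 ≤ k → k ≤ limit →
      (∀ n, n ∈ seen ↔ (r.get? n).isSome = true) →
      r.items = ((start, (0 : Int))) :: out.items →
      (∀ kv ∈ out.items, 1 ≤ kv.2) →
      r.keys.Nodup →
      cs.Nodup → ((cs.length : Int) = k - 1) →
      (∀ c ∈ cs, c ∈ pvGrid maze.length ∧ ∃ v, r.get? c = some v ∧ v < k) →
      q.length + 2 * pvFree maze.length r + 1 ≤ fA →
      ((maze.length * maze.length : Nat) : Int) + 3 ≤ (fB : Int) + k →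
      (pvLoopA maze start fA q r).items.filter (pvP limit) =
        (pvContBn maze limit fB F N k seen out).items := by
  intro fA
  induction fA with
  | zero =>
    intro q F N k r seen out cs fB _ _ _ _ _ _ _ _ _ _ _ _ _ _ hfA _
    omega
  | succ fA ih =>
    intro q F N k r seen out cs fB hFN hF hN hval hstart hk hkl hseen hro hlow hnd hcnd hlen hcs hfA hfB
    have hmsz : maze.length ≤ 3162 → ((maze.length * maze.length : Nat) : Int) ≤ 3162 * 3162 := by
      intro hsz
      exact_mod_cast Nat.mul_le_mul hsz hsz
    have hcslen : cs.length ≤ maze.length * maze.length := by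
      have h1 := (hcnd.subperm (fun c hc => (hcs c hc).1)).length_le
      rwa [length_pvGrid] at h1
    have hsent : k < 10000000 := by
      rcases hcap with h | h
      · omega
      · have := hmsz h
        have h2 : (cs.length : Int) ≤ ((maze.length * maze.length : Nat) : Int) := by
          exact_mod_cast hcslen
        omega
    cases q with
    | nil =>
      have h0 : F ++ N = ([] : List (Int × Int)) := by simpa using hFN.symm
      obtain ⟨rfl, rfl⟩ := List.append_eq_nil_iff.mp h0
      rw [pvContBn_nilF, pvLoopBn_exit maze limit fB [] (k + 1) seen out (Or.inl rfl)]
      have hA : pvLoopA maze start (fA + 1) [] r = r := rfl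
      rw [hA]
      exact pvOutKeep limit k hkl start r out hro hnd hlow hval
    | cons p q' =>
      by_cases hexp : p = start ∨ pvGetA maze p = some '#'
      · have hfilter : (p :: q').filter (pvExpB maze start) = p :: q'.filter (pvExpB maze start) :=
          List.filter_cons_of_pos (by simp [pvExpB]; exact hexp)
        -- the generic expansion step at depth k₂ (level of p), for the residual frontier
        have step : ∀ (F₂ N₂ : List (Int × Int)) (k₂ : Int) (seen₂ : PySem.Set (Int × Int))
            (out₂ : PVDict) (cs₂ : List (Int × Int)) (fB₂ : Nat),
            q'.filter (pvExpB maze start) = F₂ ++ N₂ →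
            r.get? p = some (k₂ - 1) →
            (∀ x ∈ F₂, r.get? x = some (k₂ - 1)) →
            (∀ x ∈ N₂, r.get? x = some k₂ ∧ x ∈ pvGrid maze.length) →
            (∀ c v, r.get? c = some v → v ≤ k₂) →
            1 ≤ k₂ → k₂ ≤ limit →
            (∀ n, n ∈ seen₂ ↔ (r.get? n).isSome = true) →
            r.items = ((start, (0 : Int))) :: out₂.items →
            (∀ kv ∈ out₂.items, 1 ≤ kv.2) →
            cs₂.Nodup → ((cs₂.length : Int) = k₂ - 1) →
            (∀ c ∈ cs₂, c ∈ pvGrid maze.length ∧ ∃ v, r.get? c = some v ∧ v < k₂) →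
            k₂ < 10000000 →
            ((maze.length * maze.length : Nat) : Int) + 3 ≤ (fB₂ : Int) + k₂ →
            (pvLoopA maze start (fA + 1) (p :: q') r).items.filter (pvP limit) =
              (pvContBn maze limit fB₂ (p :: F₂) N₂ k₂ seen₂ out₂).items := by
          intro F₂ N₂ k₂ seen₂ out₂ cs₂ fB₂ hFN₂ hp hF₂ hN₂ hval₂ hk₂ hkl₂ hseen₂ hro₂ hlow₂ hcnd₂ hlen₂ hcs₂ hsent₂ hfB₂
          obtain ⟨R, seen', out', a, h1, h2, hpers, hval2, hnd2, hseen2, ha, hri, hoi, hfree⟩ :=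
            pvInner maze start k₂ hsent₂ (pvNeighbours p maze) r q' seen₂ out₂ N₂
              (fun n hn => pvNeighbours_mem_grid maze p n hn) hval₂ hstart hnd
              hseen₂ (pvOutSub start r out₂ hro₂)
          have hd : r.getD p 0 + 1 = k₂ := by
            rw [PySem.Dict.getD_of_get?_eq_some r 0 hp]; ring
          have hLHS : pvLoopA maze start (fA + 1) (p :: q') r = pvLoopA maze start fA (q' ++ a) R := by
            rw [pvLoopA]
            simp only [hd, if_pos hexp, h1]
          have hcell : pvCellB maze k₂ (pvNbrsB p) seen₂ out₂ N₂ =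
              (seen', out', N₂ ++ a.filter (pvWallB maze)) := by
            rw [pvCellB_eq_proc, pvNbrsB_filter]; exact h2
          have hRHS : pvContBn maze limit fB₂ (p :: F₂) N₂ k₂ seen₂ out₂ =
              pvContBn maze limit fB₂ F₂ (N₂ ++ a.filter (pvWallB maze)) k₂ seen' out' :=
            pvContBn_step maze limit fB₂ p F₂ N₂ _ k₂ seen₂ seen' out₂ out' hcell
          rw [hLHS, hRHS]
          have hfa : a.filter (pvExpB maze start) = a.filter (pvWallB maze) := by
            refine List.filter_congr (fun x hx => ?_)
            obtain ⟨hx1, -, -⟩ := ha x hx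
            have hxs : x ≠ start := fun h => by rw [h, hstart] at hx1; cases hx1
            simp [pvExpB, pvWallB, hxs, pvGetA_eq_getB]
          refine ih (q' ++ a) F₂ (N₂ ++ a.filter (pvWallB maze)) k₂ R seen' out' cs₂ fB₂
            ?_ ?_ ?_ hval2 (hpers start 0 hstart) hk₂ hkl₂ hseen2 ?_ ?_ hnd2 hcnd₂ hlen₂ ?_ ?_ hfB₂
          · rw [List.filter_append, hFN₂, hfa, List.append_assoc]
          · exact fun x hx => hpers x _ (hF₂ x hx)
          · intro x hx
            rcases List.mem_append.mp hx with hx' | hx'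
            · exact ⟨hpers x _ (hN₂ x hx').1, (hN₂ x hx').2⟩
            · obtain ⟨-, hg2, hg3⟩ := ha x (List.mem_of_mem_filter hx')
              exact ⟨hg3, hg2⟩
          · rw [hri, hoi, hro₂]; rfl
          · intro kv hkv
            rw [hoi] at hkv
            rcases List.mem_append.mp hkv with hkv' | hkv'
            · exact hlow₂ kv hkv'
            · obtain ⟨x, -, rfl⟩ := List.mem_map.mp hkv'
              simpa using hk₂
          · intro c hc
            obtain ⟨hg, v, hv1, hv2⟩ := hcs₂ c hc
            exact ⟨hg, v, hpers c v hv1, hv2⟩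
          · have h3 : (q' ++ a).length = q'.length + a.length := List.length_append
            simp only [List.length_cons] at hfA
            omega
        rcases F with _ | ⟨f0, F'⟩
        · rw [hfilter] at hFN
          simp only [List.nil_append] at hFN
          subst hFN
          have hp0 := hN p List.mem_cons_self
          by_cases hnext : k + 1 ≤ limit
          · -- B enters the next ring
            cases fB with
            | zero =>
              exfalso
              have := hmsz ?_
              · have h2 : (cs.length : Int) ≤ ((maze.length * maze.length : Nat) : Int) := by
                  exact_mod_cast hcslen
                simp only [Nat.cast_zero, zero_add] at hfB
                omega
              · rcases hcap with h | h
                · -- even with a small limit the fuel bound cannot be hit: derive a contradiction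
                  -- from hfB directly (fB = 0 forces k ≥ size² + 3, but k - 1 = |cs| ≤ size²)
                  have h2 : (cs.length : Int) ≤ ((maze.length * maze.length : Nat) : Int) := by
                    exact_mod_cast hcslen
                  simp only [Nat.cast_zero, zero_add] at hfB
                  omega
                · exact h
            | succ fB' =>
              rw [pvContBn_nilF,
                pvLoopBn_enter maze limit fB' (p :: q'.filter (pvExpB maze start)) (k + 1) seen out
                  (by simp) hnext]
              have hpcs : p ∉ cs := fun hpc => by
                obtain ⟨-, v, hv1, hv2⟩ := hcs p hpc
                rw [hp0.1] at hv1; injection hv1 with h; omega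
              refine step (q'.filter (pvExpB maze start)) [] (k + 1) seen out (p :: cs) fB'
                (List.append_nil _).symm ?_ ?_ (by simp) ?_ (by omega) hnext hseen hro hlow
                ?_ ?_ ?_ ?_ ?_
              · rw [hp0.1]; norm_num
              · intro x hx
                rw [(hN x (List.mem_cons_of_mem _ hx)).1]; norm_num
              · exact fun c v h => le_trans (hval c v h) (by omega)
              · exact List.nodup_cons.mpr ⟨hpcs, hcnd⟩
              · simp only [List.length_cons]; push_cast; omega
              · intro c hc
                rcases List.mem_cons.mp hc with rfl | hc'
                · exact ⟨hp0.2, k, hp0.1, by omega⟩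
                · obtain ⟨hg, v, hv1, hv2⟩ := hcs c hc'
                  exact ⟨hg, v, hv1, by omega⟩
              · rcases hcap with h | h
                · omega
                · have := hmsz h
                  have h2 : (cs.length : Int) ≤ ((maze.length * maze.length : Nat) : Int) := by
                    exact_mod_cast hcslen
                  omega
              · push_cast at hfB ⊢; omega
          · -- k = limit: B is finished; A's remaining work only produces values > limit
            have hkeq : k = limit := by omega
            rw [pvContBn_nilF,
              pvLoopBn_exit maze limit fB _ (k + 1) seen out (Or.inr (by omega))]
            have hq2 : ∀ x ∈ p :: q', pvExpB maze start x = true →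
                ∃ v, r.get? x = some v ∧ limit ≤ v := by
              intro x hx hex
              have hxf : x ∈ (p :: q').filter (pvExpB maze start) := List.mem_filter.mpr ⟨hx, hex⟩
              rw [hfilter] at hxf
              obtain ⟨hv, -⟩ := hN x hxf
              exact ⟨k, hv, by omega⟩
            rw [pvPhase2 maze start limit (fA + 1) (p :: q') r hnd hq2]
            exact pvOutKeep limit k hkl start r out hro hnd hlow hval
        · rw [hfilter, List.cons_append] at hFN
          injection hFN with h1 h2
          subst h1
          exact step F' N k seen out cs fB h2 (hF p List.mem_cons_self)
            (fun x hx => hF x (List.mem_cons_of_mem _ hx)) hN hval hk hkl hseen hro hlow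
            hcnd hlen hcs hsent hfB
      · have hfilter : (p :: q').filter (pvExpB maze start) = q'.filter (pvExpB maze start) :=
          List.filter_cons_of_neg (by simp only [pvExpB, decide_eq_true_eq]; exact hexp)
        have hLHS : pvLoopA maze start (fA + 1) (p :: q') r = pvLoopA maze start fA q' r := by
          rw [pvLoopA]
          simp only [if_neg hexp]
        rw [hLHS]
        refine ih q' F N k r seen out cs fB (hfilter.symm.trans hFN) hF hN hval hstart hk hkl
          hseen hro hlow hnd hcnd hlen hcs ?_ hfB
        simp only [List.length_cons] at hfA
        omega

-- ===== VERDICT (by name: the statement is the Claim_ definition above) =====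
theorem fillwalls_spec : Claim_equal_fillwalls := by
  intro maze start limit hdom hpre
  obtain ⟨hcap, -⟩ := hpre
  unfold Spec_fillwalls fillwalls fillwalls_alt
  have hr0 : (PySem.Dict.ofList [(start, (0 : Int))] : PVDict) = PySem.Dict.empty.insert start 0 := rfl
  have hstart0 : (PySem.Dict.ofList [(start, (0 : Int))] : PVDict).get? start = some 0 := by
    rw [hr0]; exact PySem.Dict.get?_insert_self _ start 0
  have hget0 : ∀ n, (PySem.Dict.ofList [(start, (0 : Int))] : PVDict).get? n =
      if n = start then some 0 else none := by
    intro n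
    rw [hr0, PySem.Dict.get?_insert]
    by_cases h : n = start
    · rw [if_pos h, if_pos h]
    · rw [if_neg h, if_neg h, PySem.Dict.get?_empty]
  have hval0 : ∀ c v, (PySem.Dict.ofList [(start, (0 : Int))] : PVDict).get? c = some v → v ≤ 1 := by
    intro c v h
    rw [hget0] at h
    by_cases hc : c = start
    · rw [if_pos hc] at h; injection h with h'; omega
    · rw [if_neg hc] at h; cases h
  have hseen0 : ∀ n, n ∈ PySem.Set.ofList [start] ↔
      (((PySem.Dict.ofList [(start, (0 : Int))] : PVDict).get? n).isSome = true) := by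
    intro n
    rw [PySem.Set.mem_ofList, List.mem_singleton, hget0]
    by_cases h : n = start <;> simp [h]
  have hro0 : (PySem.Dict.ofList [(start, (0 : Int))] : PVDict).items =
      ((start, (0 : Int))) :: (PySem.Dict.empty : PVDict).items := rfl
  have hnd0 : (PySem.Dict.ofList [(start, (0 : Int))] : PVDict).keys.Nodup := by
    rw [hr0]
    exact PySem.Dict.nodup_keys_insert _ start 0 PySem.Dict.nodup_keys_empty
  have hpost : pvPostA (pvLoopA maze start (2 * maze.length * maze.length + 2) [start]
        (PySem.Dict.ofList [(start, (0 : Int))])) limit =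
      ((pvLoopA maze start (2 * maze.length * maze.length + 2) [start]
        (PySem.Dict.ofList [(start, (0 : Int))])).items.filter (pvP limit)).map
        (fun kv => (kv.1.1, kv.1.2, kv.2)) := rfl
  rw [hpost]
  by_cases hl1 : 1 ≤ limit
  · have hB : pvLoopBn maze limit (maze.length * maze.length + 3) [start] 1
        (PySem.Set.ofList [start]) PySem.Dict.empty =
        pvContBn maze limit (maze.length * maze.length + 2) [start] [] 1
          (PySem.Set.ofList [start]) PySem.Dict.empty := by
      rw [show maze.length * maze.length + 3 = (maze.length * maze.length + 2) + 1 by omega]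
      exact pvLoopBn_enter maze limit _ [start] 1 _ _ (by simp) hl1
    rw [hB]
    congr 1
    refine pvOuter maze start limit hcap _ [start] [start] [] 1 _ _ _ [] _
      ?_ ?_ (by simp) hval0 hstart0 le_rfl hl1 hseen0 hro0 (by rintro kv hkv; cases hkv) hnd0
      List.nodup_nil (by simp) (by simp) ?_ ?_
    · simp [pvExpB]
    · intro p hp
      rw [List.mem_singleton] at hp
      subst hp
      rw [hstart0]; norm_num
    · have h1 := pvFree_le maze.length (PySem.Dict.ofList [(start, (0 : Int))])
      have h2 : 2 * maze.length * maze.length = 2 * (maze.length * maze.length) := by ring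
      simp only [List.length_cons, List.length_nil, h2]
      omega
    · push_cast; omega
  · have hB : pvLoopBn maze limit (maze.length * maze.length + 3) [start] 1
        (PySem.Set.ofList [start]) PySem.Dict.empty = PySem.Dict.empty :=
      pvLoopBn_exit maze limit _ [start] 1 _ _ (Or.inr (by omega))
    rw [hB]
    have hq0 : ∀ p ∈ [start], pvExpB maze start p = true →
        ∃ v, (PySem.Dict.ofList [(start, (0 : Int))] : PVDict).get? p = some v ∧ limit ≤ v := by
      intro p hp _
      rw [List.mem_singleton] at hp
      subst hp
      exact ⟨0, hstart0, by omega⟩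
    rw [pvPhase2 maze start limit _ [start] _ hnd0 hq0]
    rw [hro0]
    have h0 : pvP limit ((start, (0 : Int))) = false := by simp [pvP]
    rw [List.filter_cons, h0]
    rfl
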